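-- pv_equiv track=rewrite | github.com/IOSTRM/project | project_gen.py | is_valid_partial_latin_square
-- ===== SOURCE A (Python) =====
-- def is_valid_partial_latin_square(square, n):
--     """
--     Check if the current square is a valid partial Latin square.
--     """
--     for i in range(n):
--         row_vals = [x for x in square[i] if x is not None]
--         if len(row_vals) != len(set(row_vals)):
--             return False
--         col_vals = [square[j][i] for j in range(n) if square[j][i] is not None]
--         if len(col_vals) != len(set(col_vals)):
--             return False
--     return True
-- ===== SOURCE B (Python) =====
-- def _no_dup_sorted(vals):
--     vals = sorted(vals)
--     return all(a != b for a, b in zip(vals, vals[1:]))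
--
-- def is_valid_partial_latin_square(square, n):
--     lines = [[x for x in square[i] if x is not None] for i in range(n)]
--     lines += [[square[j][i] for j in range(n) if square[j][i] is not None]
--               for i in range(n)]
--     return all(_no_dup_sorted(line) for line in lines)
-- ===== Notes on version B (the rewrite author's own statement) =====
-- stated objective: alternative
-- what changed: B replaces A's interleaved per-index set-cardinality tests (len(vals) != len(set(vals)) inside one loop) with a staged pipeline: it first materialises all 2n row/column value lists, then detects duplicates in each by sorting and scanning adjacent pairs instead of hashing into a set.
-- outside the precondition, e.g. on is_valid_partial_latin_square([[1], [1]], 2): A returns False, B raises IndexError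
import Mathlib
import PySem

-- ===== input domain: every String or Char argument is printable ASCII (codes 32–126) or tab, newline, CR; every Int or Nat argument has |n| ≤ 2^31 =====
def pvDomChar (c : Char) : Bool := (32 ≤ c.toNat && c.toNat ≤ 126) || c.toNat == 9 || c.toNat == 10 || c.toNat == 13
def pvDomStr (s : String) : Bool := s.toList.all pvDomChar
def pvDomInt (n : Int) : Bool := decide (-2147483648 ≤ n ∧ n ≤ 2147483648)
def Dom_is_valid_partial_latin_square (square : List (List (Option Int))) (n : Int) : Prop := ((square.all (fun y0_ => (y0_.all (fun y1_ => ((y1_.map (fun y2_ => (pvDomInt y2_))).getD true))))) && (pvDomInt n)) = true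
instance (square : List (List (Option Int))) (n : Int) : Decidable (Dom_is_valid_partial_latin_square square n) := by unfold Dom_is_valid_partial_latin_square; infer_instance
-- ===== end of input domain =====

-- B replaces A's interleaved per-index set-cardinality tests with a staged pipeline:
-- build all 2n row/column value lists first, then detect duplicates in each by
-- sorting and scanning adjacent pairs (objective: alternative algorithm).

-- ===== PORT A =====
-- row_vals = [x for x in square[i] if x is not None]
def pvA_rowVals (row : List (Option Int)) : List Int := row.filterMap (fun x => x)
-- col_vals = [square[j][i] for j in range(n) if square[j][i] is not None]
-- (.getD totalizes the two pyGet?; out-of-range indexing is excluded by Pre_)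
def pvA_colVals (square : List (List (Option Int))) (n i : Int) : List Int :=
  (PySem.List.pyRange 0 n 1).filterMap (fun j =>
    (PySem.List.pyGet? ((PySem.List.pyGet? square j).getD []) i).getD none)
-- the 'for i in range(n)' loop with its two early returns
def pvA_go (square : List (List (Option Int))) (n : Int) : List Int → Bool
  | [] => true
  | i :: rest =>
    let row_vals := pvA_rowVals ((PySem.List.pyGet? square i).getD [])
    if row_vals.length ≠ (PySem.Set.ofList row_vals).length then false
    else
      let col_vals := pvA_colVals square n i
      if col_vals.length ≠ (PySem.Set.ofList col_vals).length then false
      else pvA_go square n rest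

def is_valid_partial_latin_square (square : List (List (Option Int))) (n : Int) : Bool :=
  pvA_go square n (PySem.List.pyRange 0 n 1)

-- ===== PORT B =====
-- _no_dup_sorted: vals = sorted(vals); all(a != b for a, b in zip(vals, vals[1:]))
def pvB_noDupSorted (vals : List Int) : Bool :=
  ((PySem.List.sorted vals (fun x => x) false).zip
    (PySem.List.slice (PySem.List.sorted vals (fun x => x) false) (some 1) none)).all
    (fun p => decide (p.1 ≠ p.2))
-- [x for x in square[i] if x is not None]
def pvB_rowLine (square : List (List (Option Int))) (i : Int) : List Int :=
  ((PySem.List.pyGet? square i).getD []).filterMap (fun x => x)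
-- [square[j][i] for j in range(n) if square[j][i] is not None]
def pvB_colLine (square : List (List (Option Int))) (n i : Int) : List Int :=
  (PySem.List.pyRange 0 n 1).filterMap (fun j =>
    (PySem.List.pyGet? ((PySem.List.pyGet? square j).getD []) i).getD none)

def is_valid_partial_latin_square_alt (square : List (List (Option Int))) (n : Int) : Bool :=
  let lines :=
    (PySem.List.pyRange 0 n 1).map (pvB_rowLine square) ++
    (PySem.List.pyRange 0 n 1).map (pvB_colLine square n)
  lines.all pvB_noDupSorted

-- ===== PRECONDITION & SPEC =====
-- Pre_ excludes ragged/short squares where the column indexing square[j][i] (j,i < n) can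
-- raise IndexError: whether A finds a duplicate before reaching the raise is an accident
-- of its check order, and B's staged pipeline raises while still building the lines there.
def Pre_is_valid_partial_latin_square (square : List (List (Option Int))) (n : Int) : Prop :=
  n ≤ (square.length : Int) ∧ ∀ row ∈ square.take n.toNat, n ≤ (row.length : Int)
instance (square : List (List (Option Int))) (n : Int) : Decidable (Pre_is_valid_partial_latin_square square n) := by unfold Pre_is_valid_partial_latin_square; infer_instance

def pvWitness_is_valid_partial_latin_square : List (List (Option Int)) × Int :=
  ([[some 1, some 2], [some 2, none]], 2)

def Spec_is_valid_partial_latin_square (square : List (List (Option Int))) (n : Int) (out : Bool) : Prop := out = is_valid_partial_latin_square_alt square n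
instance (square : List (List (Option Int))) (n : Int) (out : Bool) : Decidable (Spec_is_valid_partial_latin_square square n out) := by unfold Spec_is_valid_partial_latin_square; infer_instance

-- ===== CLAIM (what is proved, stated in full; the proofs are below) =====
def Claim_equal_is_valid_partial_latin_square : Prop := ∀ (square : List (List (Option Int))) (n : Int), Dom_is_valid_partial_latin_square square n → Pre_is_valid_partial_latin_square square n → Spec_is_valid_partial_latin_square square n (is_valid_partial_latin_square square n)

-- ===== LEMMAS AND PROOFS =====

-- proof-side abbreviation for A's two per-index checks
def pvAcheck (square : List (List (Option Int))) (n i : Int) : Bool :=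
  (decide ((pvA_rowVals ((PySem.List.pyGet? square i).getD [])).length
      = (PySem.Set.ofList (pvA_rowVals ((PySem.List.pyGet? square i).getD []))).length)) &&
  (decide ((pvA_colVals square n i).length = (PySem.Set.ofList (pvA_colVals square n i)).length))

-- A's loop is the conjunction of its per-index checks
theorem pv_A_go_all (square : List (List (Option Int))) (n : Int) (is : List Int) :
    pvA_go square n is = is.all (pvAcheck square n) := by
  induction is with
  | nil => rfl
  | cons i rest ih =>
    simp only [pvA_go, pvAcheck, List.all_cons, ih]
    split_ifs with h1 h2 <;> simp_all

-- set(l) is a sublist of l, hence equal lengths force Nodup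
theorem pv_ofList_sublist (l : List Int) : List.Sublist (PySem.Set.ofList l) l := by
  induction l using List.reverseRecOn with
  | nil => simp [PySem.Set.ofList]
  | append_singleton xs x ih =>
    rw [PySem.Set.ofList_append_singleton, PySem.Set.add_eq_ite]
    split_ifs with h
    · exact ih.trans (List.sublist_append_left xs [x])
    · exact List.Sublist.append ih (List.Sublist.refl [x])

theorem pv_setlen_iff (l : List Int) :
    l.length = (PySem.Set.ofList l).length ↔ l.Nodup := by
  constructor
  · intro h
    have he := (pv_ofList_sublist l).eq_of_length h.symm
    rw [← he]
    exact PySem.Set.nodup_ofList l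
  · intro h
    rw [PySem.Set.ofList_eq_self_of_nodup l h]

-- on an ≤-sorted list, adjacent distinctness is exactly Nodup
theorem pv_adj_nodup (s : List Int) (hs : s.Pairwise (· ≤ ·)) :
    (s.zip s.tail).all (fun p => decide (p.1 ≠ p.2)) = decide s.Nodup := by
  induction s with
  | nil => rfl
  | cons a t ih =>
    cases t with
    | nil => simp
    | cons b u =>
      have hpw : (b :: u).Pairwise (· ≤ ·) := hs.tail
      have hab : a ≤ b := (List.pairwise_cons.mp hs).1 b (by simp)
      have hbu : ∀ c ∈ u, b ≤ c := fun c hc => (List.pairwise_cons.mp hpw).1 c hc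
      show ((a, b) :: (b :: u).zip u).all (fun p => decide (p.1 ≠ p.2)) = _
      rw [List.all_cons, show ((b :: u).zip u) = ((b :: u).zip (b :: u).tail) from rfl,
        ih hpw]
      by_cases hne : a = b
      · subst hne
        simp
      · have halt : a ∉ b :: u := by
          intro hmem
          rcases List.mem_cons.mp hmem with h | h
          · exact hne h
          · exact hne (le_antisymm hab (hbu a h))
        simp [hne]
        intro _ _ h
        exact halt (List.mem_cons.mpr (Or.inr h))

-- the sort-and-scan test IS the Nodup test
theorem pv_noDupSorted_eq (l : List Int) : pvB_noDupSorted l = decide l.Nodup := by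
  unfold pvB_noDupSorted
  rw [PySem.List.slice_from_one,
    pv_adj_nodup _ (PySem.List.sorted_pairwise l (fun x => x) )]
  exact decide_eq_decide.mpr
    (List.Perm.nodup_iff (PySem.List.sorted_perm l (fun x => x) false))

-- && distributes over a conjunction-valued all
theorem pv_all_and {α : Type} (l : List α) (f g : α → Bool) :
    l.all (fun x => f x && g x) = (l.all f && l.all g) := by
  induction l with
  | nil => rfl
  | cons x xs ih =>
    simp only [List.all_cons, ih]
    cases f x <;> cases g x <;> cases xs.all f <;> cases xs.all g <;> rfl

-- ===== VERDICT (by name: the statement is the Claim_ definition above) =====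
theorem is_valid_partial_latin_square_spec : Claim_equal_is_valid_partial_latin_square := by
  intro square n _ _
  unfold Spec_is_valid_partial_latin_square
  unfold is_valid_partial_latin_square is_valid_partial_latin_square_alt
  rw [pv_A_go_all]
  simp only [List.all_append, List.all_map, Function.comp_def]
  rw [show pvAcheck square n = fun i =>
      (pvB_noDupSorted (pvB_rowLine square i) && pvB_noDupSorted (pvB_colLine square n i))
    from funext fun i => by
      unfold pvAcheck pvB_rowLine pvB_colLine pvA_rowVals pvA_colVals
      rw [pv_noDupSorted_eq, pv_noDupSorted_eq]
      exact congrArg₂ (· && ·)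
        (decide_eq_decide.mpr (pv_setlen_iff _))
        (decide_eq_decide.mpr (pv_setlen_iff _))]
  rw [pv_all_and]
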